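-- pv_equiv track=rewrite | github.com/amit2020cs/leetcode | 1576-replace-all-s-to-avoid-consecutive-repeating-characters/1576-replace-all-s-to-avoid-consecutive-repeating-characters.py | modifyString
-- ===== SOURCE A (Python) =====
-- def modifyString(s: str) -> str:
--     s = list(s)
--     n = len(s)
--     for i in range(n):
--         if s[i] == '?':
--             # Iterate over lowercase letters until a suitable replacement is found
--             for c in 'abcdefghijklmnopqrstuvwxyz':
--                 if (i == 0 or s[i - 1] != c) and (i == n - 1 or s[i + 1] != c):
--                     s[i] = c
--                     break
--
--     return ''.join(s)
-- ===== SOURCE B (Python) =====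
-- def modifyString(s: str) -> str:
--     # Run-based: find each maximal run of '?', fill it in bulk with an
--     # alternating two-letter pattern derived in closed form from the left
--     # boundary, adjusting only the run's last cell for the right boundary.
--     n = len(s)
--     out = []
--     i = 0
--     while i < n:
--         ch = s[i]
--         if ch != '?':
--             out.append(ch)
--             i += 1
--             continue
--         j = i
--         while j < n and s[j] == '?':
--             j += 1
--         k = j - i
--         L = out[-1] if out else None
--         R = s[j] if j < n else None
--         if k == 1:
--             out.append(min(c for c in 'abc' if c != L and c != R))
--         else:
--             first = 'b' if L == 'a' else 'a'
--             second = 'b' if first == 'a' else 'a'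
--             out.extend(first if t % 2 == 0 else second for t in range(k - 1))
--             out.append(min(c for c in 'abc' if c != out[-1] and c != R))
--         i = j
--     return ''.join(out)
-- ===== Notes on version B (the rewrite author's own statement) =====
-- stated objective: alternative
-- what changed: B decomposes the string into maximal runs of '?' and fills each run in bulk with a closed-form alternating a/b pattern determined by the left boundary, fixing only the run's last cell against the right boundary, instead of A's per-character 26-letter candidate scan over a mutated list.
import Mathlib
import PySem

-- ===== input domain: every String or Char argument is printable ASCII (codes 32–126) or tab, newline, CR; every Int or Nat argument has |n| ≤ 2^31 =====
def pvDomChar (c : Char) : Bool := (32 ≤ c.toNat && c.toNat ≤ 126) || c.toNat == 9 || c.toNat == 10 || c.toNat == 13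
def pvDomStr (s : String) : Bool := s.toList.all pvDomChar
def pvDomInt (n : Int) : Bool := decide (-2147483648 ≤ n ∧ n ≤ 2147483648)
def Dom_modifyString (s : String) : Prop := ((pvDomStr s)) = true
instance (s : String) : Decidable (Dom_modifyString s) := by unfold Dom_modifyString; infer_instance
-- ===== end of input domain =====

-- B fills each maximal '?' run in bulk with a closed-form alternating a/b pattern (last cell fixed
-- against the right boundary) instead of A's per-character 26-letter candidate scan; same value.

-- ===== PORT A =====
-- the literal 'abcdefghijklmnopqrstuvwxyz'
def pvAlphabet : List Char :=
  ['a','b','c','d','e','f','g','h','i','j','k','l','m','n','o','p','q','r','s','t','u','v','w','x','y','z']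

-- one iteration of A's outer for-loop body at index i (indices are always in range, so getD is exact)
def pvStepA (n i : Nat) (cur : List Char) : List Char :=
  if cur.getD i ' ' == '?' then
    -- inner for/break: first suitable letter, if any, is written at i
    match pvAlphabet.find? (fun c =>
        (decide (i = 0) || !(cur.getD (i - 1) ' ' == c)) &&
        (decide (i = n - 1) || !(cur.getD (i + 1) ' ' == c))) with
    | some c => cur.set i c
    | none => cur
  else cur

-- 'for i in range(n)'
def pvLoopA (n : Nat) (i : Nat) (cur : List Char) : List Char :=
  if i < n then pvLoopA n (i + 1) (pvStepA n i cur) else cur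
termination_by n - i

def modifyString (s : String) : String :=
  String.ofList (pvLoopA s.toList.length 0 s.toList)

-- ===== PORT B =====
-- 'c != neighbour' (an absent neighbour, None, constrains nothing)
def pvNe (o : Option Char) (c : Char) : Bool :=
  match o with
  | none => true
  | some x => !(x == c)

-- min(c for c in 'abc' if c != L and c != R); never empty (at most two letters are excluded)
def pvPickMin (L R : Option Char) : Char :=
  match PySem.List.min? ((['a','b','c'] : List Char).filter
      (fun c => pvNe L c && pvNe R c)) (fun c => c) with
  | some c => c
  | none => '?'   -- unreachable

-- inner 'while j < n and s[j] == '?'': length of the leading run of '?'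
def pvRunLen : List Char → Nat
  | [] => 0
  | c :: r => if c == '?' then pvRunLen r + 1 else 0

-- outer while loop; the remaining suffix s[i:] is the list argument, out the output so far
def pvLoopB (out : List Char) : List Char → List Char
  | [] => out
  | ch :: rest =>
      if !(ch == '?') then pvLoopB (out ++ [ch]) rest
      else
        let k := pvRunLen (ch :: rest)
        let tail := rest.drop (k - 1)        -- suffix from j on
        let L := out.getLast?
        let R := tail.head?
        if k == 1 then pvLoopB (out ++ [pvPickMin L R]) tail
        else
          let first := if L == some 'a' then 'b' else 'a'
          let second := if first == 'a' then 'b' else 'a'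
          let body := (List.range (k - 1)).map (fun t => if t % 2 == 0 then first else second)
          let out' := out ++ body
          pvLoopB (out' ++ [pvPickMin out'.getLast? R]) tail
termination_by l => l.length
decreasing_by all_goals (simp; try omega)

def modifyString_alt (s : String) : String :=
  String.ofList (pvLoopB [] s.toList)

-- ===== PRECONDITION & SPEC =====
def Spec_modifyString (s : String) (out : String) : Prop := out = modifyString_alt s
instance (s : String) (out : String) : Decidable (Spec_modifyString s out) := by unfold Spec_modifyString; infer_instance

-- ===== CLAIM (what is proved, stated in full; the proofs are below) =====
def Claim_equal_modifyString : Prop := ∀ (s : String), Dom_modifyString s → Spec_modifyString s (modifyString s)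

-- ===== LEMMAS AND PROOFS =====

-- proof-only intermediate: one-pass rebuild picking min({'a','b','c'} \ {prev, next}) per '?'
def pvMid (out : List Char) : List Char → List Char
  | [] => out
  | ch :: rest =>
      let ch' := if ch == '?' then pvPickMin out.getLast? rest.head? else ch
      pvMid (out ++ [ch']) rest

-- ---- A = mid ----

-- A's first suitable alphabet letter is exactly min of the remaining candidates
theorem pick_eq (prev nxt : Option Char) :
    pvAlphabet.find? (fun c => pvNe prev c && pvNe nxt c)
      = some (pvPickMin prev nxt) := by
  have hx : ∀ o : Option Char, o = none ∨ o = some 'a' ∨ o = some 'b' ∨ o = some 'c' ∨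
      ((∀ c, c = 'a' ∨ c = 'b' ∨ c = 'c' → pvNe o c = true)) := by
    rintro (_ | x)
    · exact Or.inl rfl
    by_cases hxa : x = 'a'; · subst hxa; simp
    by_cases hxb : x = 'b'; · subst hxb; simp
    by_cases hxc : x = 'c'; · subst hxc; simp
    refine Or.inr (Or.inr (Or.inr (Or.inr ?_)))
    rintro c (rfl | rfl | rfl) <;> simp [pvNe, hxa, hxb, hxc]
  rcases hx prev with h1 | h1 | h1 | h1 | h1 <;> rcases hx nxt with h2 | h2 | h2 | h2 | h2 <;>
    subst_vars <;>
    first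
    | decide
    | simp_all [pvAlphabet, pvPickMin, List.find?, List.filter, PySem.List.min?, pvNe]

-- the condition A evaluates at index out.length equals the neighbour predicate
theorem cond_eq (out rest' : List Char) (ch : Char) (c : Char) :
    ((decide (out.length = 0) || !((out ++ ch :: rest').getD (out.length - 1) ' ' == c)) &&
     (decide (out.length = (out.length + (ch :: rest').length) - 1) ||
       !((out ++ ch :: rest').getD (out.length + 1) ' ' == c)))
    = (pvNe out.getLast? c && pvNe rest'.head? c) := by
  congr 1
  · rcases out.eq_nil_or_concat with rfl | ⟨l, x, rfl⟩
    · simp [pvNe]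
    · simp only [List.concat_eq_append]
      have hg : ((l ++ [x]) ++ ch :: rest').getD ((l ++ [x]).length - 1) ' ' = x := by
        rw [List.getD_eq_getElem?_getD, List.getElem?_append_left (by simp)]
        simp
      rw [hg]
      simp [pvNe]
  · rcases rest' with _ | ⟨d, r⟩
    · simp [pvNe]
    · have hg : ((out ++ ch :: d :: r)).getD (out.length + 1) ' ' = d := by
        rw [List.getD_eq_getElem?_getD, List.getElem?_append_right (by omega)]
        simp
      rw [hg]
      have : decide (out.length = out.length + (ch :: d :: r).length - 1) = false := by
        simp only [decide_eq_false_iff_not, List.length_cons]; omega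
      rw [this]
      simp [pvNe]

theorem set_mid (out rest' : List Char) (ch c : Char) :
    (out ++ ch :: rest').set out.length c = (out ++ [c]) ++ rest' := by
  induction out with
  | nil => simp
  | cons a t ih => simp [ih]

theorem a_eq_mid (rest : List Char) : ∀ out : List Char,
    pvLoopA (out.length + rest.length) out.length (out ++ rest) = pvMid out rest := by
  induction rest with
  | nil => intro out; rw [pvLoopA]; simp [pvMid]
  | cons ch rest' ih =>
    intro out
    rw [pvLoopA, if_pos (by simp)]
    have hget : (out ++ ch :: rest').getD out.length ' ' = ch := by
      rw [List.getD_eq_getElem?_getD, List.getElem?_append_right (le_refl _)]; simp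
    unfold pvStepA
    rw [hget]
    by_cases hch : ch = '?'
    · subst hch
      rw [if_pos (show ('?' == '?') = true from rfl)]
      have hc : (fun c => (decide (out.length = 0) || !((out ++ '?' :: rest').getD (out.length - 1) ' ' == c)) &&
          (decide (out.length = (out.length + ('?' :: rest').length) - 1) ||
            !((out ++ '?' :: rest').getD (out.length + 1) ' ' == c)))
          = fun c => pvNe out.getLast? c && pvNe rest'.head? c :=
        funext (cond_eq out rest' '?')
      rw [hc, pick_eq]
      show pvLoopA _ _ ((out ++ '?' :: rest').set out.length (pvPickMin out.getLast? rest'.head?)) = _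
      rw [set_mid]
      have h1 : out.length + ('?' :: rest').length = (out ++ [pvPickMin out.getLast? rest'.head?]).length + rest'.length := by
        simp only [List.length_append, List.length_cons, List.length_nil]; omega
      have h2 : out.length + 1 = (out ++ [pvPickMin out.getLast? rest'.head?]).length := by
        simp only [List.length_append, List.length_cons, List.length_nil]
      rw [h1, h2, ih]
      simp [pvMid]
    · rw [if_neg (by simpa using hch)]
      have h0 : out ++ ch :: rest' = (out ++ [ch]) ++ rest' := by simp
      have h1 : out.length + (ch :: rest').length = (out ++ [ch]).length + rest'.length := by
        simp only [List.length_append, List.length_cons, List.length_nil]; omega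
      have h2 : out.length + 1 = (out ++ [ch]).length := by simp
      rw [h0, h1, h2, ih]
      conv_rhs => rw [pvMid]
      simp [hch]

-- ---- mid = B ----

-- the alternating body B emits for the first m cells of a (m+1)-long run
def pvBody (L : Option Char) (m : Nat) : List Char :=
  if L == some 'a' then (List.range m).map (fun t => if t % 2 == 0 then 'b' else 'a')
  else (List.range m).map (fun t => if t % 2 == 0 then 'a' else 'b')

-- the whole run filler, as B builds it inline
def pvFill (L R : Option Char) (m : Nat) : List Char :=
  if m = 0 then []
  else if m = 1 then [pvPickMin L R]
  else pvBody L (m - 1) ++ [pvPickMin (pvBody L (m - 1)).getLast? R]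

-- inside a run the next char is '?', which excludes no letter: the pick is determined by prev alone
theorem pick_interior (p : Option Char) :
    pvPickMin p (some '?') = if p == some 'a' then 'b' else 'a' := by
  rcases p with _ | x
  · decide
  by_cases hxa : x = 'a'; · subst hxa; decide
  by_cases hxb : x = 'b'; · subst hxb; decide
  by_cases hxc : x = 'c'; · subst hxc; decide
  have ha : (x == 'a') = false := by simp [hxa]
  have hb : (x == 'b') = false := by simp [hxb]
  have hc : (x == 'c') = false := by simp [hxc]
  simp [pvPickMin, pvNe, List.filter, ha, hb, hc, PySem.List.min?]

theorem parity_flip (x y : Char) (t : Nat) :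
    (if (t + 1) % 2 == 0 then x else y) = (if t % 2 == 0 then y else x) := by
  rcases Nat.mod_two_eq_zero_or_one t with h | h <;> simp [Nat.add_mod, h]

theorem body_shift (x y : Char) (j : Nat) :
    (List.range (j + 1)).map (fun t => if t % 2 == 0 then x else y)
      = x :: (List.range j).map (fun t => if t % 2 == 0 then y else x) := by
  rw [List.range_succ_eq_map, List.map_cons, List.map_map]
  refine congrArg₂ _ (by simp) ?_
  refine congrArg₂ _ ?_ rfl
  funext t
  exact parity_flip x y t

theorem pvBody_ne (L : Option Char) (m : Nat) (hm : m ≠ 0) : pvBody L m ≠ [] := by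
  unfold pvBody
  split <;> simp <;> omega

theorem getLast?_cons_ne (x : Char) (l : List Char) (h : l ≠ []) :
    (x :: l).getLast? = l.getLast? := by
  rw [show x :: l = [x] ++ l from rfl, List.getLast?_append_of_ne_nil _ h]

theorem fill_step (L R : Option Char) (m : Nat) (hm : 2 ≤ m) :
    pvFill L R m =
      (if L == some 'a' then 'b' else 'a') ::
        pvFill (some (if L == some 'a' then 'b' else 'a')) R (m - 1) := by
  have h1 : pvFill L R m = pvBody L (m - 1) ++ [pvPickMin (pvBody L (m - 1)).getLast? R] := by
    unfold pvFill
    rw [if_neg (by omega), if_neg (by omega)]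
  by_cases hm1 : m = 2
  · subst hm1
    by_cases h : L = some 'a' <;>
      simp [pvFill, pvBody, h, List.range_succ]
  · have hm3 : 3 ≤ m := by omega
    have hm2 : m - 1 - 1 = m - 2 := by omega
    have hr : m - 1 = (m - 2) + 1 := by omega
    by_cases h : L = some 'a'
    · subst h
      have h2 : pvFill (some 'b') R (m - 1)
          = pvBody (some 'b') (m - 2) ++ [pvPickMin (pvBody (some 'b') (m - 2)).getLast? R] := by
        unfold pvFill
        rw [if_neg (by omega), if_neg (by omega), hm2]
      have hb1 : pvBody (some 'a') (m - 1) = 'b' :: pvBody (some 'b') (m - 2) := by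
        unfold pvBody
        rw [show ((some 'a' : Option Char) == some 'a') = true from rfl,
          show ((some 'b' : Option Char) == some 'a') = false from rfl]
        simp only [if_true, Bool.false_eq_true, if_false]
        rw [hr, body_shift]
      rw [h1]
      rw [show ((some 'a' : Option Char) == some 'a') = true from rfl]
      simp only [if_true]
      rw [h2, hb1, getLast?_cons_ne _ _ (pvBody_ne _ _ (by omega))]
      simp
    · have hL : (L == some 'a') = false := by
        rcases L with _ | x
        · rfl
        · simpa using fun hx => h (by rw [hx])
      have h2 : pvFill (some 'a') R (m - 1)
          = pvBody (some 'a') (m - 2) ++ [pvPickMin (pvBody (some 'a') (m - 2)).getLast? R] := by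
        unfold pvFill
        rw [if_neg (by omega), if_neg (by omega), hm2]
      have hb1 : pvBody L (m - 1) = 'a' :: pvBody (some 'a') (m - 2) := by
        unfold pvBody
        rw [hL, show ((some 'a' : Option Char) == some 'a') = true from rfl]
        simp only [if_true, Bool.false_eq_true, if_false]
        rw [hr, body_shift]
      rw [hL, h1]
      simp only [Bool.false_eq_true, if_false]
      rw [h2, hb1, getLast?_cons_ne _ _ (pvBody_ne _ _ (by omega))]
      simp

theorem run_mid (m : Nat) : ∀ (out tail : List Char),
    pvMid out (List.replicate m '?' ++ tail)
      = pvMid (out ++ pvFill out.getLast? tail.head? m) tail := by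
  induction m with
  | zero => intro out tail; simp [pvFill]
  | succ m ih =>
    intro out tail
    rcases Nat.eq_zero_or_pos m with rfl | hm
    · simp only [List.replicate, List.nil_append, List.cons_append]
      show pvMid out ('?' :: tail) = _
      rw [pvMid]
      simp [pvFill, pvPickMin]
    · have hrep : List.replicate (m + 1) '?' ++ tail = '?' :: (List.replicate m '?' ++ tail) := by
        simp [List.replicate_succ]
      rw [hrep, pvMid]
      have hhead : (List.replicate m '?' ++ tail).head? = some '?' := by
        cases m with
        | zero => omega
        | succ m' => simp [List.replicate_succ]
      simp only [hhead, if_pos (show ('?' == '?') = true from rfl), pick_interior]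
      rw [ih]
      have hlast : (out ++ [if out.getLast? == some 'a' then 'b' else 'a']).getLast?
          = some (if out.getLast? == some 'a' then 'b' else 'a') := by simp
      rw [hlast]
      have hfs := fill_step out.getLast? tail.head? (m + 1) (by omega)
      simp only [Nat.add_sub_cancel] at hfs
      rw [hfs]
      simp [List.append_assoc]

-- pvRunLen facts
theorem runlen_decomp (l : List Char) :
    l = List.replicate (pvRunLen l) '?' ++ l.drop (pvRunLen l) := by
  induction l with
  | nil => simp [pvRunLen]
  | cons c r ih =>
    by_cases h : c = '?'
    · subst h
      simp only [pvRunLen, if_pos (show ('?' == '?') = true from rfl)]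
      rw [List.replicate_succ]
      simpa using ih
    · simp [pvRunLen, h]

theorem mid_eq_b (n : Nat) : ∀ (rest : List Char), rest.length ≤ n →
    ∀ out : List Char, pvMid out rest = pvLoopB out rest := by
  induction n with
  | zero =>
    intro rest h out
    have : rest = [] := List.eq_nil_of_length_eq_zero (by omega)
    subst this; rw [pvMid, pvLoopB]
  | succ n ih =>
    intro rest hlen out
    match rest with
    | [] => rw [pvMid, pvLoopB]
    | ch :: rest' =>
      by_cases hch : ch = '?'
      · subst hch
        set k := pvRunLen ('?' :: rest') with hk
        have hk1 : 1 ≤ k := by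
          rw [hk]; simp [pvRunLen]
        have hdecomp := runlen_decomp ('?' :: rest')
        rw [← hk] at hdecomp
        set tail := ('?' :: rest').drop k with ht
        have htail : tail = rest'.drop (k - 1) := by
          rw [ht]
          cases hkk : k with
          | zero => omega
          | succ k' => simp
        have hlt : tail.length ≤ n := by
          have h1 : tail.length + k = ('?' :: rest').length := by
            conv_rhs => rw [hdecomp]
            simp [Nat.add_comm]
          simp only [List.length_cons] at h1 hlen
          omega
        have hL : pvMid out ('?' :: rest')
            = pvMid (out ++ pvFill out.getLast? tail.head? k) tail := by
          conv_lhs => rw [hdecomp]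
          exact run_mid k out tail
        rw [hL, ih tail hlt]
        rw [pvLoopB]
        simp only [show (!('?' == '?')) = false from rfl, Bool.false_eq_true, if_false, ← hk, ← htail]
        by_cases hk1' : k = 1
        · rw [if_pos (by simp [hk1']), hk1']
          simp [pvFill]
        · rw [if_neg (by simpa using hk1')]
          have hbody : (List.range (k - 1)).map
                (fun t => if t % 2 == 0 then (if out.getLast? == some 'a' then 'b' else 'a')
                  else (if (if out.getLast? == some 'a' then 'b' else 'a') == 'a' then 'b' else 'a'))
              = pvBody out.getLast? (k - 1) := by
            by_cases h : out.getLast? = some 'a' <;> simp [pvBody, h]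
          rw [hbody, List.getLast?_append_of_ne_nil _ (pvBody_ne _ _ (by omega))]
          have hfill : pvFill out.getLast? tail.head? k
              = pvBody out.getLast? (k - 1)
                ++ [pvPickMin (pvBody out.getLast? (k - 1)).getLast? tail.head?] := by
            unfold pvFill
            rw [if_neg (by omega), if_neg hk1']
          rw [hfill]
          simp [List.append_assoc]
      · rw [pvMid, pvLoopB]
        have hb : (ch == '?') = false := by simp [hch]
        simp only [hb, Bool.false_eq_true, if_false, Bool.not_false, if_true]
        exact ih rest' (by simp at hlen ⊢; omega) (out ++ [ch])

-- ===== VERDICT (by name: the statement is the Claim_ definition above) =====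
theorem modifyString_spec : Claim_equal_modifyString := by
  intro s _
  unfold Spec_modifyString modifyString modifyString_alt
  have h := a_eq_mid s.toList []
  simp only [List.nil_append, List.length_nil, Nat.zero_add] at h
  rw [h, mid_eq_b s.toList.length s.toList (le_refl _) []]
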